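-- pv_equiv track=rewrite | github.com/lnguyenh/aoc-python | year2025/days/05/__init__.py | do_part_1
-- ===== SOURCE A (Python) =====
-- def do_part_1(processed_input):
--     ranges, ingredients = processed_input
--     count = 0
--     for i in ingredients:
--         for r in ranges:
--             if r[0] <= i <= r[1]:
--                 count += 1
--                 break
--     return count
-- ===== SOURCE B (Python) =====
-- def do_part_1(processed_input):
--     ranges, ingredients = processed_input
--     # build non-empty intervals, sorted by start
--     intervals = sorted(((r[0], r[1]) for r in ranges if r[0] <= r[1]),
--                        key=lambda t: t[0])
--     # merge overlapping intervals into a disjoint, sorted list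
--     merged = []
--     for lo, hi in intervals:
--         if merged and lo <= merged[-1][1]:
--             if hi > merged[-1][1]:
--                 merged[-1] = (merged[-1][0], hi)
--         else:
--             merged.append((lo, hi))
--     # one sweep over sorted ingredients with a pointer into merged
--     count = 0
--     k = 0
--     for i in sorted(ingredients):
--         while k < len(merged) and merged[k][1] < i:
--             k += 1
--         if k < len(merged) and merged[k][0] <= i:
--             count += 1
--     return count
-- ===== Notes on version B (the rewrite author's own statement) =====
-- stated objective: faster
-- what changed: Instead of scanning all ranges per ingredient, B sorts and merges the ranges once into disjoint intervals and then sweeps over the sorted ingredients with a single advancing pointer.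
-- outside the precondition, e.g. on do_part_1(([[1, 5], [3]], [2])): A returns 1, B raises IndexError
import Mathlib
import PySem

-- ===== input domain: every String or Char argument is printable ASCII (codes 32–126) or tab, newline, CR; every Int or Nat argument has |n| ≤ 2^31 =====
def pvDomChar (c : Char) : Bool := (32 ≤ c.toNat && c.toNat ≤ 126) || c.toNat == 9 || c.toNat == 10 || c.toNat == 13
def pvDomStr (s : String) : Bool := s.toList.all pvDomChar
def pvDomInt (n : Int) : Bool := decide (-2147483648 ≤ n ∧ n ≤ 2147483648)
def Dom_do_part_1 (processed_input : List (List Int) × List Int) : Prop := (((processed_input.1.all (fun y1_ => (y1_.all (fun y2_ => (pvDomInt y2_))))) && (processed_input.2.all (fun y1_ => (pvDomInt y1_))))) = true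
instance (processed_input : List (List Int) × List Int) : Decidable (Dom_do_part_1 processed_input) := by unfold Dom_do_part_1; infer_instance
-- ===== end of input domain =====

-- B replaces A's per-ingredient scan of all ranges by a one-time sort-and-merge of the
-- ranges followed by a single pointer sweep over the sorted ingredients (faster).

-- ===== PORT A =====
-- inner 'for r in ranges: if r[0] <= i <= r[1]: count += 1; break' — True iff some range covers i
def pvCoverA (i : Int) : List (List Int) → Bool
  | [] => false
  | r :: rs =>
      if PySem.List.pyGetD r 0 0 ≤ i ∧ i ≤ PySem.List.pyGetD r 1 0 then true
      else pvCoverA i rs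

def do_part_1 (processed_input : List (List Int) × List Int) : Int :=
  let ranges := processed_input.1
  let ingredients := processed_input.2
  ingredients.foldl (fun count i => if pvCoverA i ranges then count + 1 else count) 0

-- ===== PORT B =====
-- (r[0], r[1])
def pvToIv (r : List Int) : Int × Int := (PySem.List.pyGetD r 0 0, PySem.List.pyGetD r 1 0)

-- sorted(((r[0], r[1]) for r in ranges if r[0] <= r[1]), key=lambda t: t[0])
def pvIntervals (ranges : List (List Int)) : List (Int × Int) :=
  PySem.List.sorted
    ((ranges.filter (fun r => decide (PySem.List.pyGetD r 0 0 ≤ PySem.List.pyGetD r 1 0))).map pvToIv)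
    (fun t => t.1) false

-- one iteration of Source B's merge loop; 'merged' is kept REVERSED (head = Python's merged[-1])
def pvMergeStep (acc : List (Int × Int)) (p : Int × Int) : List (Int × Int) :=
  match acc with
  | [] => [p]
  | (llo, lhi) :: rest =>
      if p.1 ≤ lhi then
        if lhi < p.2 then (llo, p.2) :: rest else (llo, lhi) :: rest
      else p :: (llo, lhi) :: rest

def pvMerged (ivs : List (Int × Int)) : List (Int × Int) :=
  (ivs.foldl pvMergeStep []).reverse

-- Source B's sweep; the index k into merged is ported as the suffix merged[k:] (ms)
def pvSweep : List Int → List (Int × Int) → Int → Int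
  | [], _, count => count
  | i :: rest, ms, count =>
      let ms' := ms.dropWhile (fun p => decide (p.2 < i))
      match ms' with
      | [] => pvSweep rest [] count
      | (lo, hi) :: t => pvSweep rest ((lo, hi) :: t) (if lo ≤ i then count + 1 else count)

def do_part_1_alt (processed_input : List (List Int) × List Int) : Int :=
  let ranges := processed_input.1
  let ingredients := processed_input.2
  pvSweep (PySem.List.sorted ingredients (fun x => x) false)
    (pvMerged (pvIntervals ranges)) 0

-- ===== PRECONDITION & SPEC =====
-- Pre_ excludes inputs containing a range list of fewer than 2 elements: there Python A raises
-- IndexError as soon as some ingredient is not covered by an earlier range (and B always raises);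
-- on the few such inputs where A still returns (every ingredient breaks early), B raises, so they
-- cannot be matched and are excluded.
def Pre_do_part_1 (processed_input : List (List Int) × List Int) : Prop :=
  ∀ r ∈ processed_input.1, 2 ≤ r.length
instance (processed_input : List (List Int) × List Int) : Decidable (Pre_do_part_1 processed_input) := by unfold Pre_do_part_1; infer_instance

def pvWitness_do_part_1 : (List (List Int) × List Int) := ([[1, 3], [5, 2]], [2, 6, 3])

def Spec_do_part_1 (processed_input : List (List Int) × List Int) (out : Int) : Prop := out = do_part_1_alt processed_input
instance (processed_input : List (List Int) × List Int) (out : Int) : Decidable (Spec_do_part_1 processed_input out) := by unfold Spec_do_part_1; infer_instance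

-- ===== CLAIM (what is proved, stated in full; the proofs are below) =====
def Claim_equal_do_part_1 : Prop := ∀ (processed_input : List (List Int) × List Int), Dom_do_part_1 processed_input → Pre_do_part_1 processed_input → Spec_do_part_1 processed_input (do_part_1 processed_input)

-- ===== LEMMAS AND PROOFS =====

-- does interval p contain i?
def pvCover (i : Int) (p : Int × Int) : Bool := decide (p.1 ≤ i ∧ i ≤ p.2)

-- A's inner loop is an 'any' over the intervals (r[0], r[1])
lemma pvCoverA_eq_any (i : Int) (rs : List (List Int)) :
    pvCoverA i rs = (rs.map pvToIv).any (pvCover i) := by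
  induction rs with
  | nil => rfl
  | cons r rs ih =>
      simp [pvCoverA, pvToIv, pvCover, List.any_cons, ih]

-- dropping the empty ranges (r[0] > r[1]) does not change coverage
lemma pvFilter_any (x : Int) (rs : List (List Int)) :
    ((rs.filter (fun r => decide (PySem.List.pyGetD r 0 0 ≤ PySem.List.pyGetD r 1 0))).map pvToIv).any (pvCover x)
      = (rs.map pvToIv).any (pvCover x) := by
  induction rs with
  | nil => rfl
  | cons r rs ih =>
      by_cases h : PySem.List.pyGetD r 0 0 ≤ PySem.List.pyGetD r 1 0
      · simp [h, List.any_cons, ih]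
      · have hc : pvCover x (pvToIv r) = false := by
          simp [pvCover, pvToIv]; omega
        simp [h, List.any_cons, ih, hc]

-- 'any' only depends on the members
lemma pvAny_of_perm {l₁ l₂ : List (Int × Int)} (h : l₁.Perm l₂) (p : (Int × Int) → Bool) :
    l₁.any p = l₂.any p := by
  rw [Bool.eq_iff_iff]; simp only [List.any_eq_true]
  exact ⟨fun ⟨a, ha, hp⟩ => ⟨a, h.mem_iff.mp ha, hp⟩, fun ⟨a, ha, hp⟩ => ⟨a, h.mem_iff.mpr ha, hp⟩⟩

-- the merge loop keeps the start-sorted shape (reversed) and the covered set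
lemma pvMerge_fold (ivs : List (Int × Int)) :
    ∀ acc : List (Int × Int),
    ivs.Pairwise (fun a b => a.1 ≤ b.1) →
    (∀ q ∈ acc, ∀ p ∈ ivs, q.1 ≤ p.1) →
    acc.Pairwise (fun a b => b.1 ≤ a.1) →
    (ivs.foldl pvMergeStep acc).Pairwise (fun a b => b.1 ≤ a.1) ∧
    ∀ x, (ivs.foldl pvMergeStep acc).any (pvCover x) = (acc.any (pvCover x) || ivs.any (pvCover x)) := by
  induction ivs with
  | nil => intro acc _ _ hacc; exact ⟨hacc, fun x => by simp⟩
  | cons p rest ih =>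
      intro acc hso hcross hacc
      have hso' : rest.Pairwise (fun a b => a.1 ≤ b.1) := hso.tail
      have hsop : ∀ q ∈ rest, p.1 ≤ q.1 := List.pairwise_cons.mp hso |>.1
      -- shape and cross facts for the new accumulator
      have hcross' : ∀ q ∈ pvMergeStep acc p, ∀ p' ∈ rest, q.1 ≤ p'.1 := by
        intro q hq p' hp'
        match hA : acc with
        | [] =>
            simp [pvMergeStep] at hq; subst hq; exact hsop p' hp'
        | (llo, lhi) :: t =>
            simp only [pvMergeStep] at hq
            split_ifs at hq with h1 h2 <;> simp at hq <;>
              rcases hq with hq | hq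
            · subst hq; exact le_trans (hcross (llo, lhi) (by simp) p (by simp)) (hsop p' hp')
            · exact hcross q (by simp [hq]) p' (by simp [hp'])
            · subst hq; exact le_trans (hcross (llo, lhi) (by simp) p (by simp)) (hsop p' hp')
            · exact hcross q (by simp [hq]) p' (by simp [hp'])
            · subst hq; exact hsop p' hp'
            · exact hcross q (by simp [hq]) p' (by simp [hp'])
      have hacc' : (pvMergeStep acc p).Pairwise (fun a b => b.1 ≤ a.1) := by
        match hA : acc with
        | [] => simp [pvMergeStep]
        | (llo, lhi) :: t =>
            simp only [pvMergeStep]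
            rcases List.pairwise_cons.mp hacc with ⟨hhead, htail⟩
            split_ifs with h1 h2
            · exact List.pairwise_cons.mpr ⟨hhead, htail⟩
            · exact List.pairwise_cons.mpr ⟨hhead, htail⟩
            · refine List.pairwise_cons.mpr ⟨?_, List.pairwise_cons.mpr ⟨hhead, htail⟩⟩
              intro q hq
              rcases List.mem_cons.mp hq with hq | hq
              · subst hq; exact hcross (llo, lhi) (by simp) p (by simp)
              · exact le_trans (hhead q hq) (hcross (llo, lhi) (by simp) p (by simp))
      -- coverage of one step
      have hstep : ∀ x, (pvMergeStep acc p).any (pvCover x) = (acc.any (pvCover x) || pvCover x p) := by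
        intro x
        match hA : acc with
        | [] => simp [pvMergeStep]
        | (llo, lhi) :: t =>
            have hlo : llo ≤ p.1 := hcross (llo, lhi) (by simp [hA]) p (by simp)
            simp only [pvMergeStep]
            split_ifs with h1 h2
            · -- merged: [llo, p.2]
              have : pvCover x (llo, p.2) = (pvCover x (llo, lhi) || pvCover x p) := by
                rw [Bool.eq_iff_iff]
                simp only [pvCover, Bool.or_eq_true, decide_eq_true_eq]
                omega
              simp only [List.any_cons]
              rw [this]
              cases pvCover x (llo, lhi) <;> cases pvCover x p <;> simp
            · -- absorbed: p ⊆ [llo, lhi]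
              have habs : pvCover x p = true → pvCover x (llo, lhi) = true := by
                simp only [pvCover, decide_eq_true_eq]
                omega
              simp only [List.any_cons]
              cases hp : pvCover x p
              · simp
              · simp [habs hp]
            · -- new interval
              simp [List.any_cons, Bool.or_comm]
      rcases ih (pvMergeStep acc p) hso' hcross' hacc' with ⟨hp, hcov⟩
      refine ⟨by simpa using hp, fun x => ?_⟩
      simp only [List.foldl_cons] at *
      rw [hcov x, hstep x]
      simp [List.any_cons, Bool.or_assoc]

-- the sweep counts the covered ingredients, for sorted ingredients and start-sorted intervals
lemma pvSweep_eq (ing : List Int) :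
    ∀ (ms : List (Int × Int)) (c : Int),
    ing.Pairwise (· ≤ ·) →
    ms.Pairwise (fun a b => a.1 ≤ b.1) →
    pvSweep ing ms c = c + (ing.countP (fun i => ms.any (pvCover i)) : Int) := by
  induction ing with
  | nil => intro ms c _ _; simp [pvSweep]
  | cons i rest ih =>
      intro ms c hing hms
      have hrest : rest.Pairwise (· ≤ ·) := hing.tail
      have hle : ∀ j ∈ rest, i ≤ j := List.pairwise_cons.mp hing |>.1
      set ms' := ms.dropWhile (fun p => decide (p.2 < i)) with hms'
      have hsplit : ms = ms.takeWhile (fun p => decide (p.2 < i)) ++ ms' :=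
        (List.takeWhile_append_dropWhile).symm
      have htake : ∀ q ∈ ms.takeWhile (fun p => decide (p.2 < i)), q.2 < i := by
        intro q hq
        have := List.mem_takeWhile_imp hq
        simpa using this
      have hms'pw : ms'.Pairwise (fun a b => a.1 ≤ b.1) :=
        hms.sublist (List.dropWhile_sublist _)
      -- for any j ≥ i, coverage over ms equals coverage over ms'
      have hcov_eq : ∀ j, i ≤ j → ms.any (pvCover j) = ms'.any (pvCover j) := by
        intro j hj
        conv_lhs => rw [hsplit]
        rw [List.any_append]
        have : (ms.takeWhile (fun p => decide (p.2 < i))).any (pvCover j) = false := by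
          simp only [List.any_eq_false]
          intro q hq
          have := htake q hq
          simp [pvCover]; omega
        simp [this]
      have hcnt : rest.countP (fun j => ms.any (pvCover j)) = rest.countP (fun j => ms'.any (pvCover j)) := by
        apply List.countP_congr
        intro j hj
        rw [hcov_eq j (hle j hj)]
      match hM : ms' with
      | [] =>
          have h0 : ms.any (pvCover i) = false := by rw [hcov_eq i le_rfl, hM]; rfl
          rw [show pvSweep (i :: rest) ms c = pvSweep rest [] c by
                simp only [pvSweep, ← hms', hM]]
          rw [ih [] c hrest List.Pairwise.nil]
          simp [h0, hcnt, hM]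
      | (lo, hi) :: t =>
          have hhd : ¬ (hi < i) := by
            have : ¬ ((fun p : Int × Int => decide (p.2 < i)) (lo, hi) = true) := by
              have := List.head?_dropWhile_not (fun p : Int × Int => decide (p.2 < i)) ms
              rw [← hms', hM] at this
              simpa using this
            simpa using this
          have hany : ms.any (pvCover i) = decide (lo ≤ i) := by
            rw [hcov_eq i le_rfl, hM]
            by_cases hloi : lo ≤ i
            · have : pvCover i (lo, hi) = true := by simp [pvCover]; omega
              simp [List.any_cons, this, hloi]
            · have hnone : ∀ q ∈ (lo, hi) :: t, ¬ pvCover i q = true := by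
                intro q hq
                have hq1 : lo ≤ q.1 := by
                  rcases List.mem_cons.mp hq with h | h
                  · subst h; rfl
                  · exact (List.pairwise_cons.mp (hM ▸ hms'pw)).1 q h
                simp only [pvCover, decide_eq_true_eq]
                omega
              rw [List.any_eq_false.mpr hnone]
              simp [hloi]
          rw [show pvSweep (i :: rest) ms c = pvSweep rest ((lo, hi) :: t) (if lo ≤ i then c + 1 else c) by
                simp only [pvSweep, ← hms', hM]]
          rw [ih ((lo, hi) :: t) _ hrest (hM ▸ hms'pw)]
          rw [List.countP_cons]
          simp only [hany, hcnt, hM]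
          by_cases hloi : lo ≤ i <;> simp [hloi] <;> ring

-- pointwise: the merged intervals cover exactly what the original ranges cover
lemma pvMerged_any (ranges : List (List Int)) (x : Int) :
    (pvMerged (pvIntervals ranges)).any (pvCover x) = (ranges.map pvToIv).any (pvCover x) := by
  have hperm := PySem.List.sorted_perm
    ((ranges.filter (fun r => decide (PySem.List.pyGetD r 0 0 ≤ PySem.List.pyGetD r 1 0))).map pvToIv)
    (fun t : Int × Int => t.1) false
  have hpw : (pvIntervals ranges).Pairwise (fun a b => a.1 ≤ b.1) :=
    PySem.List.sorted_pairwise _ _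
  rcases pvMerge_fold (pvIntervals ranges) [] hpw (by simp) List.Pairwise.nil with ⟨_, hcov⟩
  have h1 : (pvMerged (pvIntervals ranges)).any (pvCover x)
      = ((pvIntervals ranges).foldl pvMergeStep []).any (pvCover x) := by
    unfold pvMerged
    exact pvAny_of_perm (List.reverse_perm _) _
  rw [h1, hcov x]
  simp only [Bool.false_or, List.any_nil]
  unfold pvIntervals
  rw [pvAny_of_perm hperm, pvFilter_any]

lemma pvMerged_pairwise (ranges : List (List Int)) :
    (pvMerged (pvIntervals ranges)).Pairwise (fun a b => a.1 ≤ b.1) := by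
  have hpw : (pvIntervals ranges).Pairwise (fun a b => a.1 ≤ b.1) :=
    PySem.List.sorted_pairwise _ _
  rcases pvMerge_fold (pvIntervals ranges) [] hpw (by simp) List.Pairwise.nil with ⟨hp, _⟩
  unfold pvMerged
  exact (List.pairwise_reverse).mpr (by simpa using hp)

-- ===== VERDICT (by name: the statement is the Claim_ definition above) =====
theorem do_part_1_spec : Claim_equal_do_part_1 := by
  intro pi _ _
  unfold Spec_do_part_1 do_part_1 do_part_1_alt
  obtain ⟨ranges, ings⟩ := pi
  simp only
  -- A side: a countP over the ingredients
  have hA : ings.foldl (fun count i => if pvCoverA i ranges then count + 1 else count) 0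
      = (0 : Int) + (ings.countP (fun i => pvCoverA i ranges) : Int) :=
    PySem.List.foldl_if_add_one _ _ _
  rw [hA]
  -- B side: the sweep is a countP over the sorted ingredients
  have hsorted : (PySem.List.sorted ings (fun x => x) false).Pairwise (· ≤ ·) :=
    PySem.List.sorted_pairwise _ _
  rw [pvSweep_eq _ _ _ hsorted (pvMerged_pairwise ranges)]
  have hpt : (PySem.List.sorted ings (fun x => x) false).countP
        (fun i => (pvMerged (pvIntervals ranges)).any (pvCover i))
      = (PySem.List.sorted ings (fun x => x) false).countP (fun i => pvCoverA i ranges) := by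
    apply List.countP_congr
    intro i _
    rw [pvMerged_any, pvCoverA_eq_any]
  rw [hpt]
  have hperm : (PySem.List.sorted ings (fun x => x) false).Perm ings :=
    PySem.List.sorted_perm _ _ _
  rw [hperm.countP_eq]
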